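-- pv_equiv track=rewrite | github.com/brain-frog/pokerogue-utility | utils.py | getSpeciesGeneration
-- ===== SOURCE A (Python) =====
-- def getSpeciesGeneration(speciesId):
--     generation = {
--         1: 151,
--         2: 251,
--         3: 386,
--         4: 493,
--         5: 649,
--         6: 721,
--         7: 809,
--         8: 905,
--         9: 1025,
--         10: 2105, # alolan forms
--         11: 2670, # eternal flower floette
--         12: 4618, # galarian forms
--         13: 6724, # hisuian forms
--         14: 8901, # paldean forms
--     }
--     for g in generation:
--         if speciesId <= generation[g]:
--             if g > 9:
--                 if g == 10:
--                     return 7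
--                 elif g == 11:
--                     return 6
--                 elif g == 12 or g == 13:
--                     return 8
--                 else:
--                     return 9
--             else:
--                 return g
-- ===== SOURCE B (Python) =====
-- THRESHOLDS = [151, 251, 386, 493, 649, 721, 809, 905, 1025, 2105, 2670, 4618, 6724, 8901]
-- GENS = [1, 2, 3, 4, 5, 6, 7, 8, 9, 7, 6, 8, 8, 9]
--
-- def getSpeciesGeneration(speciesId):
--     # binary search for the first threshold >= speciesId (bisect_left)
--     lo, hi = 0, len(THRESHOLDS)
--     while lo < hi:
--         mid = (lo + hi) // 2
--         if THRESHOLDS[mid] < speciesId: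
--             lo = mid + 1
--         else:
--             hi = mid
--     if lo == len(THRESHOLDS):
--         return None
--     return GENS[lo]
-- ===== Notes on version B (the rewrite author's own statement) =====
-- stated objective: alternative
-- what changed: Replaced the linear scan over a dict plus a nested branch chain with a binary search (hand-written bisect_left) into a flat sorted threshold list paired with a parallel generation-output table.
import Mathlib
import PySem

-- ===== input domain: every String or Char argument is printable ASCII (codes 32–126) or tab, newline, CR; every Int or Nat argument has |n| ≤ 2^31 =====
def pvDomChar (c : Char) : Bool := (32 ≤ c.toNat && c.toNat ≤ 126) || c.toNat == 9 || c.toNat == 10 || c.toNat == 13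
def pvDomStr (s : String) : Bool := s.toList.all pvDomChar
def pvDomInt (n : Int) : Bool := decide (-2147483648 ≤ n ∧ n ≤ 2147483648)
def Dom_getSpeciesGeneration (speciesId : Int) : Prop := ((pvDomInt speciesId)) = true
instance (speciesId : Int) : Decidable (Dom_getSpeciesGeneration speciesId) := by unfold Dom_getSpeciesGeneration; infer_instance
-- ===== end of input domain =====

-- B replaces A's linear dict scan + nested branch chain by a binary search into a flat
-- threshold table with a parallel output table (alternative structure, same exact values).

-- ===== PORT A =====
-- the dict 'generation' in insertion order (keys 1..14 mapped to thresholds)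
def pvGenDict : List (Int × Int) :=
  [(1, 151), (2, 251), (3, 386), (4, 493), (5, 649), (6, 721), (7, 809),
   (8, 905), (9, 1025), (10, 2105), (11, 2670), (12, 4618), (13, 6724), (14, 8901)]

-- 'for g in generation: …' — iterate over the keys in insertion order; the body's
-- generation[g] lookup is carried as the pair's second component.
def pvALoop (speciesId : Int) : List (Int × Int) → Option Int
  | [] => none
  | (g, t) :: rest =>
    if speciesId ≤ t then
      if g > 9 then
        if g = 10 then some 7
        else if g = 11 then some 6
        else if g = 12 ∨ g = 13 then some 8
        else some 9
      else some g
    else pvALoop speciesId rest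

def getSpeciesGeneration (speciesId : Int) : Option Int :=
  pvALoop speciesId pvGenDict

-- ===== PORT B =====
def pvThresholds : List Int := [151, 251, 386, 493, 649, 721, 809, 905, 1025, 2105, 2670, 4618, 6724, 8901]
def pvGens : List Int := [1, 2, 3, 4, 5, 6, 7, 8, 9, 7, 6, 8, 8, 9]

-- the hand-written bisect_left while-loop of Source B; indices stay in range (mid < hi ≤ 14)
-- so THRESHOLDS[mid] is ported as getD with an unused default.
def pvBisect (speciesId : Int) (lo hi : Nat) : Nat :=
  if h : lo < hi then
    -- mid = (lo + hi) // 2, inlined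
    if pvThresholds.getD ((lo + hi) / 2) 0 < speciesId then pvBisect speciesId ((lo + hi) / 2 + 1) hi
    else pvBisect speciesId lo ((lo + hi) / 2)
  else lo
termination_by hi - lo
decreasing_by all_goals omega

def getSpeciesGeneration_alt (speciesId : Int) : Option Int :=
  let lo := pvBisect speciesId 0 pvThresholds.length
  if lo = pvThresholds.length then none
  else some (pvGens.getD lo 0)

-- ===== PRECONDITION & SPEC =====
def Spec_getSpeciesGeneration (speciesId : Int) (out : Option Int) : Prop := out = getSpeciesGeneration_alt speciesId
instance (speciesId : Int) (out : Option Int) : Decidable (Spec_getSpeciesGeneration speciesId out) := by unfold Spec_getSpeciesGeneration; infer_instance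

-- ===== CLAIM (what is proved, stated in full; the proofs are below) =====
def Claim_equal_getSpeciesGeneration : Prop := ∀ (speciesId : Int), Dom_getSpeciesGeneration speciesId → Spec_getSpeciesGeneration speciesId (getSpeciesGeneration speciesId)

-- ===== LEMMAS AND PROOFS =====

-- ===== VERDICT (by name: the statement is the Claim_ definition above) =====
theorem getSpeciesGeneration_spec : Claim_equal_getSpeciesGeneration := by
  intro s _
  unfold Spec_getSpeciesGeneration getSpeciesGeneration getSpeciesGeneration_alt
  by_cases h0 : s ≤ 151
  · simp [pvALoop, pvGenDict, pvBisect, pvThresholds, pvGens, List.getD, show s ≤ 151 from by omega, show ¬ (905:Int) < s from by omega, show ¬ (493:Int) < s from by omega, show ¬ (251:Int) < s from by omega, show ¬ (151:Int) < s from by omega]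
  by_cases h1 : s ≤ 251
  · simp [pvALoop, pvGenDict, pvBisect, pvThresholds, pvGens, List.getD, show ¬ s ≤ 151 from by omega, show s ≤ 251 from by omega, show ¬ (905:Int) < s from by omega, show ¬ (493:Int) < s from by omega, show ¬ (251:Int) < s from by omega, show (151:Int) < s from by omega]
  by_cases h2 : s ≤ 386
  · simp [pvALoop, pvGenDict, pvBisect, pvThresholds, pvGens, List.getD, show ¬ s ≤ 151 from by omega, show ¬ s ≤ 251 from by omega, show s ≤ 386 from by omega, show ¬ (905:Int) < s from by omega, show ¬ (493:Int) < s from by omega, show (251:Int) < s from by omega, show ¬ (386:Int) < s from by omega]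
  by_cases h3 : s ≤ 493
  · simp [pvALoop, pvGenDict, pvBisect, pvThresholds, pvGens, List.getD, show ¬ s ≤ 151 from by omega, show ¬ s ≤ 251 from by omega, show ¬ s ≤ 386 from by omega, show s ≤ 493 from by omega, show ¬ (905:Int) < s from by omega, show ¬ (493:Int) < s from by omega, show (251:Int) < s from by omega, show (386:Int) < s from by omega]
  by_cases h4 : s ≤ 649
  · simp [pvALoop, pvGenDict, pvBisect, pvThresholds, pvGens, List.getD, show ¬ s ≤ 151 from by omega, show ¬ s ≤ 251 from by omega, show ¬ s ≤ 386 from by omega, show ¬ s ≤ 493 from by omega, show s ≤ 649 from by omega, show ¬ (905:Int) < s from by omega, show (493:Int) < s from by omega, show ¬ (721:Int) < s from by omega, show ¬ (649:Int) < s from by omega]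
  by_cases h5 : s ≤ 721
  · simp [pvALoop, pvGenDict, pvBisect, pvThresholds, pvGens, List.getD, show ¬ s ≤ 151 from by omega, show ¬ s ≤ 251 from by omega, show ¬ s ≤ 386 from by omega, show ¬ s ≤ 493 from by omega, show ¬ s ≤ 649 from by omega, show s ≤ 721 from by omega, show ¬ (905:Int) < s from by omega, show (493:Int) < s from by omega, show ¬ (721:Int) < s from by omega, show (649:Int) < s from by omega]
  by_cases h6 : s ≤ 809
  · simp [pvALoop, pvGenDict, pvBisect, pvThresholds, pvGens, List.getD, show ¬ s ≤ 151 from by omega, show ¬ s ≤ 251 from by omega, show ¬ s ≤ 386 from by omega, show ¬ s ≤ 493 from by omega, show ¬ s ≤ 649 from by omega, show ¬ s ≤ 721 from by omega, show s ≤ 809 from by omega, show ¬ (905:Int) < s from by omega, show (493:Int) < s from by omega, show (721:Int) < s from by omega, show ¬ (809:Int) < s from by omega]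
  by_cases h7 : s ≤ 905
  · simp [pvALoop, pvGenDict, pvBisect, pvThresholds, pvGens, List.getD, show ¬ s ≤ 151 from by omega, show ¬ s ≤ 251 from by omega, show ¬ s ≤ 386 from by omega, show ¬ s ≤ 493 from by omega, show ¬ s ≤ 649 from by omega, show ¬ s ≤ 721 from by omega, show ¬ s ≤ 809 from by omega, show s ≤ 905 from by omega, show ¬ (905:Int) < s from by omega, show (493:Int) < s from by omega, show (721:Int) < s from by omega, show (809:Int) < s from by omega]
  by_cases h8 : s ≤ 1025
  · simp [pvALoop, pvGenDict, pvBisect, pvThresholds, pvGens, List.getD, show ¬ s ≤ 151 from by omega, show ¬ s ≤ 251 from by omega, show ¬ s ≤ 386 from by omega, show ¬ s ≤ 493 from by omega, show ¬ s ≤ 649 from by omega, show ¬ s ≤ 721 from by omega, show ¬ s ≤ 809 from by omega, show ¬ s ≤ 905 from by omega, show s ≤ 1025 from by omega, show (905:Int) < s from by omega, show ¬ (4618:Int) < s from by omega, show ¬ (2105:Int) < s from by omega, show ¬ (1025:Int) < s from by omega]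
  by_cases h9 : s ≤ 2105
  · simp [pvALoop, pvGenDict, pvBisect, pvThresholds, pvGens, List.getD, show ¬ s ≤ 151 from by omega, show ¬ s ≤ 251 from by omega, show ¬ s ≤ 386 from by omega, show ¬ s ≤ 493 from by omega, show ¬ s ≤ 649 from by omega, show ¬ s ≤ 721 from by omega, show ¬ s ≤ 809 from by omega, show ¬ s ≤ 905 from by omega, show ¬ s ≤ 1025 from by omega, show s ≤ 2105 from by omega, show (905:Int) < s from by omega, show ¬ (4618:Int) < s from by omega, show ¬ (2105:Int) < s from by omega, show (1025:Int) < s from by omega]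
  by_cases h10 : s ≤ 2670
  · simp [pvALoop, pvGenDict, pvBisect, pvThresholds, pvGens, List.getD, show ¬ s ≤ 151 from by omega, show ¬ s ≤ 251 from by omega, show ¬ s ≤ 386 from by omega, show ¬ s ≤ 493 from by omega, show ¬ s ≤ 649 from by omega, show ¬ s ≤ 721 from by omega, show ¬ s ≤ 809 from by omega, show ¬ s ≤ 905 from by omega, show ¬ s ≤ 1025 from by omega, show ¬ s ≤ 2105 from by omega, show s ≤ 2670 from by omega, show (905:Int) < s from by omega, show ¬ (4618:Int) < s from by omega, show (2105:Int) < s from by omega, show ¬ (2670:Int) < s from by omega]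
  by_cases h11 : s ≤ 4618
  · simp [pvALoop, pvGenDict, pvBisect, pvThresholds, pvGens, List.getD, show ¬ s ≤ 151 from by omega, show ¬ s ≤ 251 from by omega, show ¬ s ≤ 386 from by omega, show ¬ s ≤ 493 from by omega, show ¬ s ≤ 649 from by omega, show ¬ s ≤ 721 from by omega, show ¬ s ≤ 809 from by omega, show ¬ s ≤ 905 from by omega, show ¬ s ≤ 1025 from by omega, show ¬ s ≤ 2105 from by omega, show ¬ s ≤ 2670 from by omega, show s ≤ 4618 from by omega, show (905:Int) < s from by omega, show ¬ (4618:Int) < s from by omega, show (2105:Int) < s from by omega, show (2670:Int) < s from by omega]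
  by_cases h12 : s ≤ 6724
  · simp [pvALoop, pvGenDict, pvBisect, pvThresholds, pvGens, List.getD, show ¬ s ≤ 151 from by omega, show ¬ s ≤ 251 from by omega, show ¬ s ≤ 386 from by omega, show ¬ s ≤ 493 from by omega, show ¬ s ≤ 649 from by omega, show ¬ s ≤ 721 from by omega, show ¬ s ≤ 809 from by omega, show ¬ s ≤ 905 from by omega, show ¬ s ≤ 1025 from by omega, show ¬ s ≤ 2105 from by omega, show ¬ s ≤ 2670 from by omega, show ¬ s ≤ 4618 from by omega, show s ≤ 6724 from by omega, show (905:Int) < s from by omega, show (4618:Int) < s from by omega, show ¬ (8901:Int) < s from by omega, show ¬ (6724:Int) < s from by omega]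
  by_cases h13 : s ≤ 8901
  · simp [pvALoop, pvGenDict, pvBisect, pvThresholds, pvGens, List.getD, show ¬ s ≤ 151 from by omega, show ¬ s ≤ 251 from by omega, show ¬ s ≤ 386 from by omega, show ¬ s ≤ 493 from by omega, show ¬ s ≤ 649 from by omega, show ¬ s ≤ 721 from by omega, show ¬ s ≤ 809 from by omega, show ¬ s ≤ 905 from by omega, show ¬ s ≤ 1025 from by omega, show ¬ s ≤ 2105 from by omega, show ¬ s ≤ 2670 from by omega, show ¬ s ≤ 4618 from by omega, show ¬ s ≤ 6724 from by omega, show s ≤ 8901 from by omega, show (905:Int) < s from by omega, show (4618:Int) < s from by omega, show ¬ (8901:Int) < s from by omega, show (6724:Int) < s from by omega]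
  · simp [pvALoop, pvGenDict, pvBisect, pvThresholds, List.getD, show ¬ s ≤ 151 from by omega, show ¬ s ≤ 251 from by omega, show ¬ s ≤ 386 from by omega, show ¬ s ≤ 493 from by omega, show ¬ s ≤ 649 from by omega, show ¬ s ≤ 721 from by omega, show ¬ s ≤ 809 from by omega, show ¬ s ≤ 905 from by omega, show ¬ s ≤ 1025 from by omega, show ¬ s ≤ 2105 from by omega, show ¬ s ≤ 2670 from by omega, show ¬ s ≤ 4618 from by omega, show ¬ s ≤ 6724 from by omega, show ¬ s ≤ 8901 from by omega, show (905:Int) < s from by omega, show (4618:Int) < s from by omega, show (8901:Int) < s from by omega]
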